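-- pv_equiv track=rewrite | github.com/guqtls14/python-algorism-study | 박상준/완전탐색&백트래킹/2661.좋은수열.py | is_good_arr
-- ===== SOURCE A (Python) =====
-- def is_good_arr(arr):
--     arr_len = len(arr)
--     # 절반 만큼 확인
--     for part_len in range(1, arr_len // 2 + 1):  # 비교할 부분수열의 길이
--         for part_start in range(part_len, arr_len - part_len + 1):
--             # 같은 부분의 수열을 발견한다면
--             if arr[part_start - part_len:part_start] == arr[part_start:part_start + part_len]:
--                 return False
--     else:  # 모든 부분의 수열이  다르면
--         return True
-- ===== SOURCE B (Python) =====
-- def is_good_arr(arr):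
--     n = len(arr)
--     for L in range(1, n // 2 + 1):
--         run = 0
--         for i in range(n - L):
--             run = run + 1 if arr[i] == arr[i + L] else 0
--             if run >= L:
--                 return False
--     return True
-- ===== Notes on version B (the rewrite author's own statement) =====
-- stated objective: faster
-- what changed: Instead of comparing two length-L slices at every start position, B fixes the shift L once and makes a single pass maintaining a run counter of consecutive positions i with arr[i]==arr[i+L]; a run of length L is exactly an adjacent repeated block, so the inner slice comparisons disappear (O(n^2) vs O(n^3)).
import Mathlib
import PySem

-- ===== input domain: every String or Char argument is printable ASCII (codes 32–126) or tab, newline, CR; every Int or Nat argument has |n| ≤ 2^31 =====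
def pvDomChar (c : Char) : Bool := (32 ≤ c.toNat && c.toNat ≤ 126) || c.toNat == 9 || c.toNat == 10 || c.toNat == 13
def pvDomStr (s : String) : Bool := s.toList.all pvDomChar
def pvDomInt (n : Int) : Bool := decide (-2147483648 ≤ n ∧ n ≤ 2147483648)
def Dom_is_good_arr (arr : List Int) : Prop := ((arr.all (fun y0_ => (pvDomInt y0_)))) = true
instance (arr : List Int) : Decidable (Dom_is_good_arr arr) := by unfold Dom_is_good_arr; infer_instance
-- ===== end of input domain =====

-- B replaces A's per-start slice comparisons by one pass per shift L that keeps a run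
-- counter of consecutive matching positions (objective: alternative algorithm).

-- ===== PORT A =====
-- literal port of A: for part_len in range(1, n//2+1): for part_start in range(part_len, n-part_len+1):
--   if arr[part_start-part_len:part_start] == arr[part_start:part_start+part_len]: return False; return True
def is_good_arr (arr : List Int) : Bool :=
  let arr_len : Int := arr.length
  if (PySem.List.pyRange 1 (PySem.Int.floordiv arr_len 2 + 1) 1).any (fun part_len =>
      (PySem.List.pyRange part_len (arr_len - part_len + 1) 1).any (fun part_start =>
        PySem.List.slice arr (some (part_start - part_len)) (some part_start)
          == PySem.List.slice arr (some part_start) (some (part_start + part_len))))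
  then false else true

-- ===== PORT B =====
-- inner loop of Source B: run = run+1 if arr[i]==arr[i+L] else 0; return False (here true) when run >= L.
-- arr[i], arr[i+L] are always in range here, so getD 0 is exact.
def altLoop (arr : List Int) (L : Nat) : Nat → Nat → Nat → Bool
  | 0, _, _ => false
  | k + 1, i, run =>
    let run' := if arr.getD i 0 = arr.getD (i + L) 0 then run + 1 else 0
    if L ≤ run' then true else altLoop arr L k (i + 1) run'

def is_good_arr_alt (arr : List Int) : Bool :=
  let n := arr.length
  if (List.range (n / 2)).any (fun j => altLoop arr (j + 1) (n - (j + 1)) 0 0)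
  then false else true

-- ===== PRECONDITION & SPEC =====
def Spec_is_good_arr (arr : List Int) (out : Bool) : Prop := out = is_good_arr_alt arr
instance (arr : List Int) (out : Bool) : Decidable (Spec_is_good_arr arr out) := by unfold Spec_is_good_arr; infer_instance

-- ===== CLAIM (what is proved, stated in full; the proofs are below) =====
def Claim_equal_is_good_arr : Prop := ∀ (arr : List Int), Dom_is_good_arr arr → Spec_is_good_arr arr (is_good_arr arr)

-- ===== LEMMAS AND PROOFS =====

-- the run-counter values B's inner loop goes through, as a sequence
def runSeq (arr : List Int) (L i run : Nat) : Nat → Nat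
  | 0 => run
  | t + 1 => if arr.getD (i + t) 0 = arr.getD (i + t + L) 0 then runSeq arr L i run t + 1 else 0

theorem runSeq_shift (arr : List Int) (L i run : Nat) :
    ∀ t, runSeq arr L (i + 1) (runSeq arr L i run 1) t = runSeq arr L i run (t + 1) := by
  intro t
  induction t with
  | zero => rfl
  | succ t ih =>
      show (if arr.getD (i + 1 + t) 0 = arr.getD (i + 1 + t + L) 0
              then runSeq arr L (i + 1) (runSeq arr L i run 1) t + 1 else 0) = _
      rw [ih]
      have e : i + 1 + t = i + (t + 1) := by omega
      rw [e]
      rfl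

theorem altLoop_iff (arr : List Int) (L : Nat) :
    ∀ k i run, altLoop arr L k i run = true ↔ ∃ t, t < k ∧ L ≤ runSeq arr L i run (t + 1) := by
  intro k
  induction k with
  | zero => intro i run; simp [altLoop]
  | succ k ih =>
      intro i run
      simp only [altLoop]
      have hrun1 : (if arr.getD i 0 = arr.getD (i + L) 0 then run + 1 else 0)
          = runSeq arr L i run 1 := by simp [runSeq]
      by_cases h : L ≤ (if arr.getD i 0 = arr.getD (i + L) 0 then run + 1 else 0)
      · rw [if_pos h]
        constructor
        · intro _
          exact ⟨0, by omega, by rw [← hrun1]; exact h⟩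
        · intro _; rfl
      · rw [if_neg h, ih]
        constructor
        · rintro ⟨t, ht, hrun⟩
          refine ⟨t + 1, by omega, ?_⟩
          rw [← runSeq_shift arr L i run (t + 1), ← hrun1]
          exact hrun
        · rintro ⟨t, ht, hrun⟩
          match t with
          | 0 => exact absurd (by rw [hrun1]; exact hrun) h
          | t + 1 =>
              refine ⟨t, by omega, ?_⟩
              rw [hrun1, runSeq_shift arr L i run (t + 1)]
              exact hrun

-- run counter from (0,0): being ≥ c means the last c positions all match
theorem runSeq_ge_iff (arr : List Int) (L : Nat) :
    ∀ s c, c ≤ runSeq arr L 0 0 s ↔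
      c ≤ s ∧ ∀ j, s - c ≤ j → j < s → arr.getD j 0 = arr.getD (j + L) 0 := by
  intro s
  induction s with
  | zero =>
      intro c
      simp only [runSeq]
      constructor
      · intro h; exact ⟨h, by omega⟩
      · intro ⟨h, _⟩; exact h
  | succ s ih =>
      intro c
      simp only [runSeq, Nat.zero_add]
      by_cases h : arr.getD s 0 = arr.getD (s + L) 0
      · rw [if_pos h]
        match c with
        | 0 => simp; omega
        | c + 1 =>
            rw [Nat.succ_le_succ_iff, ih c]
            constructor
            · rintro ⟨hc, hall⟩
              refine ⟨by omega, ?_⟩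
              intro j hj1 hj2
              by_cases hjs : j = s
              · subst hjs; exact h
              · exact hall j (by omega) (by omega)
            · rintro ⟨hc, hall⟩
              exact ⟨by omega, fun j hj1 hj2 => hall j (by omega) (by omega)⟩
      · rw [if_neg h]
        constructor
        · intro hc
          have : c = 0 := by omega
          subst this; exact ⟨by omega, by omega⟩
        · rintro ⟨hc, hall⟩
          match c with
          | 0 => omega
          | c + 1 => exact absurd (hall s (by omega) (by omega)) h

-- getD of an element of a drop/take window
theorem getD_take_drop (xs : List Int) (a L i : Nat) (hi : i < L) (h : a + i < xs.length) :
    ((xs.drop a).take L).getD i 0 = xs.getD (a + i) 0 := by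
  rw [List.getD_eq_getElem _ 0 (by simp only [List.length_take, List.length_drop]; omega)]
  rw [List.getElem_take, List.getElem_drop, List.getD_eq_getElem _ 0 h]

-- pointwise characterisation of A's slice comparison
theorem slice_eq_iff (arr : List Int) (s L : Nat) (hL : 1 ≤ L) (hs : L ≤ s)
    (hsn : s + L ≤ arr.length) :
    ((arr.drop (s - L)).take L = (arr.drop s).take L) ↔
      ∀ j, s - L ≤ j → j < s → arr.getD j 0 = arr.getD (j + L) 0 := by
  constructor
  · intro heq j hj1 hj2
    have hi : j - (s - L) < L := by omega
    have hA := getD_take_drop arr (s - L) L (j - (s - L)) hi (by omega)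
    have hB := getD_take_drop arr s L (j - (s - L)) hi (by omega)
    rw [heq] at hA
    rw [show s - L + (j - (s - L)) = j from by omega] at hA
    rw [show s + (j - (s - L)) = j + L from by omega] at hB
    rw [← hA, ← hB]
  · intro hall
    apply List.ext_getElem
    · simp only [List.length_take, List.length_drop]; omega
    · intro i h1 h2
      have hiL : i < L := by
        simp only [List.length_take, List.length_drop] at h1; omega
      have hA := getD_take_drop arr (s - L) L i hiL (by omega)
      have hB := getD_take_drop arr s L i hiL (by omega)
      have hg := hall (s - L + i) (by omega) (by omega)
      rw [show s - L + i + L = s + i from by omega] at hg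
      rw [List.getD_eq_getElem _ 0 h1] at hA
      rw [List.getD_eq_getElem _ 0 h2] at hB
      rw [hA, hB]
      exact hg

-- B's inner loop for shift L detects exactly what A's inner loop over starts detects
theorem inner_iff (arr : List Int) (L : Nat) (hL : 1 ≤ L) (h2L : 2 * L ≤ arr.length) :
    altLoop arr L (arr.length - L) 0 0 = true ↔
      ∃ s : Nat, L ≤ s ∧ s + L ≤ arr.length ∧
        (arr.drop (s - L)).take L = (arr.drop s).take L := by
  rw [altLoop_iff]
  constructor
  · rintro ⟨t, ht, hrun⟩
    refine ⟨t + 1, ?_, ?_, ?_⟩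
    · have := (runSeq_ge_iff arr L (t + 1) L).1 hrun
      exact this.1
    · omega
    · rw [slice_eq_iff arr (t + 1) L hL ((runSeq_ge_iff arr L (t + 1) L).1 hrun).1 (by omega)]
      exact ((runSeq_ge_iff arr L (t + 1) L).1 hrun).2
  · rintro ⟨s, hs1, hs2, heq⟩
    refine ⟨s - 1, by omega, ?_⟩
    have hs : s - 1 + 1 = s := by omega
    rw [hs, runSeq_ge_iff]
    exact ⟨hs1, (slice_eq_iff arr s L hL hs1 hs2).1 heq⟩

-- A's slice arguments reduce to drop/take on Nat indices
theorem sliceA_eq (arr : List Int) (s L : Nat) (hs : L ≤ s) :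
    (PySem.List.slice arr (some ((s : Int) - (L : Int))) (some (s : Int)) =
     (arr.drop (s - L)).take L) ∧
    (PySem.List.slice arr (some (s : Int)) (some ((s : Int) + (L : Int))) =
     (arr.drop s).take L) := by
  constructor
  · have e : (s : Int) - (L : Int) = ((s - L : Nat) : Int) := by omega
    rw [e, PySem.List.slice_natCast]
    congr 1; omega
  · rw [PySem.List.slice_natCast_add]

theorem main_eq (arr : List Int) : is_good_arr arr = is_good_arr_alt arr := by
  have hcond :
      ((PySem.List.pyRange 1 (PySem.Int.floordiv (arr.length : Int) 2 + 1) 1).any (fun part_len =>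
        (PySem.List.pyRange part_len ((arr.length : Int) - part_len + 1) 1).any (fun part_start =>
          PySem.List.slice arr (some (part_start - part_len)) (some part_start)
            == PySem.List.slice arr (some part_start) (some (part_start + part_len)))))
      = ((List.range (arr.length / 2)).any (fun j => altLoop arr (j + 1) (arr.length - (j + 1)) 0 0)) := by
    apply Bool.coe_iff_coe.1
    simp only [List.any_eq_true, PySem.List.mem_pyRange_one, List.mem_range, beq_iff_eq]
    constructor
    · rintro ⟨L, ⟨hL1, hL2⟩, x, ⟨hx1, hx2⟩, heq⟩
      have hfd : PySem.Int.floordiv (arr.length : Int) 2 = ((arr.length / 2 : Nat) : Int) :=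
        PySem.Int.floordiv_natCast arr.length 2
      rw [hfd] at hL2
      -- L and x are nonnegative integers
      obtain ⟨Ln, rfl⟩ : ∃ Ln : Nat, L = (Ln : Int) := ⟨L.toNat, by omega⟩
      obtain ⟨s, rfl⟩ : ∃ s : Nat, x = (s : Int) := ⟨x.toNat, by omega⟩
      have hLn1 : 1 ≤ Ln := by exact_mod_cast hL1
      have hLn2 : Ln ≤ arr.length / 2 := by omega
      refine ⟨Ln - 1, by omega, ?_⟩
      have hL' : Ln - 1 + 1 = Ln := by omega
      rw [hL', (inner_iff arr Ln hLn1 (by omega))]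
      refine ⟨s, by exact_mod_cast hx1, by omega, ?_⟩
      rw [← (sliceA_eq arr s Ln (by exact_mod_cast hx1)).1,
          ← (sliceA_eq arr s Ln (by exact_mod_cast hx1)).2]
      exact heq
    · rintro ⟨j, hj, hloop⟩
      rw [inner_iff arr (j + 1) (by omega) (by omega)] at hloop
      obtain ⟨s, hs1, hs2, heq⟩ := hloop
      have hfd : PySem.Int.floordiv (arr.length : Int) 2 = ((arr.length / 2 : Nat) : Int) :=
        PySem.Int.floordiv_natCast arr.length 2
      refine ⟨((j + 1 : Nat) : Int), ⟨by exact_mod_cast Nat.one_le_iff_ne_zero.2 (by omega), ?_⟩,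
              ((s : Nat) : Int), ⟨by exact_mod_cast hs1, by push_cast; omega⟩, ?_⟩
      · rw [hfd]; push_cast; omega
      · rw [(sliceA_eq arr s (j + 1) hs1).1, (sliceA_eq arr s (j + 1) hs1).2]
        exact heq
  show (if (PySem.List.pyRange 1 (PySem.Int.floordiv (arr.length : Int) 2 + 1) 1).any (fun part_len =>
      (PySem.List.pyRange part_len ((arr.length : Int) - part_len + 1) 1).any (fun part_start =>
        PySem.List.slice arr (some (part_start - part_len)) (some part_start)
          == PySem.List.slice arr (some part_start) (some (part_start + part_len))))
    then false else true)
    = (if (List.range (arr.length / 2)).any (fun j => altLoop arr (j + 1) (arr.length - (j + 1)) 0 0)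
    then false else true)
  rw [hcond]

-- ===== VERDICT (by name: the statement is the Claim_ definition above) =====
theorem is_good_arr_spec : Claim_equal_is_good_arr := by
  intro arr _
  unfold Spec_is_good_arr
  exact main_eq arr
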